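-- pv_equiv track=rewrite | github.com/jbrjake/giles | hooks/verify_agent_output.py | _unescape_basic_string
-- ===== SOURCE A (Python) =====
-- def _unescape_basic_string(s: str) -> str:
--     """Unescape TOML basic string escape sequences (BH29-001).
--
--     Per TOML spec, double-quoted strings process escape sequences:
--     \\\" -> \", \\\\ -> \\, \\n -> newline, \\t -> tab, \\r -> CR.
--     Unknown escapes are preserved as-is for safety.
--     """
--     result: list[str] = []
--     i = 0
--     while i < len(s):
--         if s[i] == '\\' and i + 1 < len(s):
--             nxt = s[i + 1]
--             if nxt == '"':
--                 result.append('"')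
--             elif nxt == '\\':
--                 result.append('\\')
--             elif nxt == 'n':
--                 result.append('\n')
--             elif nxt == 't':
--                 result.append('\t')
--             elif nxt == 'r':
--                 result.append('\r')
--             else:
--                 result.append(s[i])
--                 result.append(nxt)
--             i += 2
--         else:
--             result.append(s[i])
--             i += 1
--     return "".join(result)
-- ===== SOURCE B (Python) =====
-- _TABLE = {'"': '"', '\\': '\\', 'n': '\n', 't': '\t', 'r': '\r'}
--
-- def _unescape_basic_string(s: str) -> str:
--     """Unescape TOML basic string escapes by splitting on the backslash.
--
--     s.split('\\') cuts the string at every backslash; each later piece begins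
--     with the character that followed a backslash.  A non-empty piece is an
--     escape of its first character (unknown escapes keep the backslash); an
--     empty piece is an escaped backslash (the following piece is then literal)
--     or, when it is the last piece, a lone trailing backslash.
--     """
--     parts = s.split('\\')
--     out = [parts[0]]
--     i, n = 1, len(parts)
--     while i < n:
--         p = parts[i]
--         if p:
--             rep = _TABLE.get(p[0])
--             out.append(rep + p[1:] if rep is not None else '\\' + p)
--             i += 1
--         elif i + 1 < n:
--             out.append('\\' + parts[i + 1])
--             i += 2
--         else:
--             out.append('\\')
--             i += 1
--     return ''.join(out)
-- ===== Notes on version B (the rewrite author's own statement) =====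
-- stated objective: faster
-- what changed: B replaces A's per-character index loop (manual i+=2 escape stepping with an elif chain) by a single s.split('\') that cuts the string at every backslash, then a short pass over the pieces using a lookup table, so ordinary characters are never visited one by one.
import Mathlib
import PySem

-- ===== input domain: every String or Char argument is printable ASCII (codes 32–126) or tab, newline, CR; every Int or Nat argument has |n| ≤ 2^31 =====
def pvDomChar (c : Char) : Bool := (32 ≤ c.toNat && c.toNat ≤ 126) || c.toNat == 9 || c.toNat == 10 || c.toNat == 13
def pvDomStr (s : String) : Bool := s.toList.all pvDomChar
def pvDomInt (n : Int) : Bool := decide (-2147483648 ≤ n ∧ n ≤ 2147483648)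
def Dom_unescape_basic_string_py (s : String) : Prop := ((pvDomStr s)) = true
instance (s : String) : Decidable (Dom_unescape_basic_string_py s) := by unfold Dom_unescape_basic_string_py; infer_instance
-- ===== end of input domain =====

-- B replaces A's per-character index loop by one str.split('\\') plus a pass over the pieces
-- (objective: faster — a timing run measures it; return values proved equal on all of Dom).

-- ===== PORT A =====
-- A's while-loop: index i over s, escapes consume two characters, results collected and joined.
def unescapeALoop (cs : List Char) (i : Nat) (result : List (List Char)) : List (List Char) :=
  if h : i < cs.length then
    if h2 : cs[i] = '\\' ∧ i + 1 < cs.length then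
      let nxt := cs[i+1]'h2.2
      if nxt = '"' then unescapeALoop cs (i+2) (result ++ [['"']])
      else if nxt = '\\' then unescapeALoop cs (i+2) (result ++ [['\\']])
      else if nxt = 'n' then unescapeALoop cs (i+2) (result ++ [['\n']])
      else if nxt = 't' then unescapeALoop cs (i+2) (result ++ [['\t']])
      else if nxt = 'r' then unescapeALoop cs (i+2) (result ++ [['\r']])
      else unescapeALoop cs (i+2) (result ++ [[cs[i]], [nxt]])
    else unescapeALoop cs (i+1) (result ++ [[cs[i]]])
  else result
termination_by cs.length - i

def unescape_basic_string_py (s : String) : String :=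
  String.mk (PySem.Chars.join [] (unescapeALoop s.toList 0 []))

-- ===== PORT B =====
def pvEscTable : PySem.Dict Char Char :=
  ⟨[('"', '"'), ('\\', '\\'), ('n', '\n'), ('t', '\t'), ('r', '\r')]⟩

-- Source B's while over parts[1:]: a non-empty piece is an escape of its first char,
-- an empty piece is an escaped backslash (next piece literal) or a trailing backslash.
def pvPieces (parts : List (List Char)) : List (List Char) :=
  match parts with
  | [] => []
  | (c :: tl) :: rest =>
    (match PySem.Dict.get? pvEscTable c with
     | some r => r :: tl
     | none => '\\' :: c :: tl) :: pvPieces rest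
  | [] :: (q :: rest') => ('\\' :: q) :: pvPieces rest'
  | [[]] => [['\\']]

def unescape_basic_string_py_alt (s : String) : String :=
  match PySem.Chars.splitOn s.toList ['\\'] with
  | [] => ""   -- unreachable: split never returns an empty list
  | p0 :: rest => String.mk (PySem.Chars.join [] (p0 :: pvPieces rest))

-- ===== PRECONDITION & SPEC =====
def Spec_unescape_basic_string_py (s : String) (out : String) : Prop := out = unescape_basic_string_py_alt s
instance (s : String) (out : String) : Decidable (Spec_unescape_basic_string_py s out) := by unfold Spec_unescape_basic_string_py; infer_instance

-- ===== CLAIM (what is proved, stated in full; the proofs are below) =====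
def Claim_equal_unescape_basic_string_py : Prop := ∀ (s : String), Dom_unescape_basic_string_py s → Spec_unescape_basic_string_py s (unescape_basic_string_py s)

-- ===== LEMMAS AND PROOFS =====

/-- The replacement for an escaped character `c` (the common spec both ports meet). -/
def pvRep (c : Char) : List Char :=
  if c = '"' then ['"'] else if c = '\\' then ['\\'] else if c = 'n' then ['\n']
  else if c = 't' then ['\t'] else if c = 'r' then ['\r'] else ['\\', c]

/-- Reference unescaper: structural recursion consuming one or two characters. -/
def pvUnesc : List Char → List Char
  | [] => []
  | [c] => [c]
  | c :: d :: rest => if c = '\\' then pvRep d ++ pvUnesc rest else c :: pvUnesc (d :: rest)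

/-- Reference split-on-backslash: first piece and the remaining pieces. -/
def pvSplit : List Char → List Char × List (List Char)
  | [] => ([], [])
  | c :: r =>
    let (h, t) := pvSplit r
    if c = '\\' then ([], h :: t) else (c :: h, t)

lemma pvJoin_nil_eq_flatten (l : List (List Char)) : PySem.Chars.join [] l = l.flatten := by
  induction l with
  | nil => simp [PySem.Chars.join_nil]
  | cons p rest ih =>
    cases rest with
    | nil => simp [PySem.Chars.join_singleton]
    | cons q t => simp [PySem.Chars.join_cons_cons] at ih ⊢; simpa using ih

lemma pvUnesc_cons (c : Char) (l : List Char) (h : c ≠ '\\' ∨ l = []) :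
    pvUnesc (c :: l) = c :: pvUnesc l := by
  cases l with
  | nil => simp [pvUnesc]
  | cons d r =>
    rcases h with h | h
    · simp [pvUnesc, h]
    · simp at h

lemma pvGo_spec (cs : List Char) : ∀ (fuel : Nat), cs.length ≤ fuel → ∀ (cur : List Char) (acc : List (List Char)),
    PySem.Chars.splitOn.go ['\\'] fuel cs cur acc
      = acc.reverse ++ (cur.reverse ++ (pvSplit cs).1) :: (pvSplit cs).2 := by
  induction cs with
  | nil =>
    intro fuel _ cur acc
    cases fuel <;> simp [PySem.Chars.splitOn.go, pvSplit]
  | cons c r ih =>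
    intro fuel hf cur acc
    cases fuel with
    | zero => simp at hf
    | succ f =>
      by_cases hc : c = '\\'
      · subst hc
        rw [show PySem.Chars.splitOn.go ['\\'] (f+1) ('\\' :: r) cur acc
              = PySem.Chars.splitOn.go ['\\'] f r [] (cur.reverse :: acc) from by
            simp [PySem.Chars.splitOn.go, List.isPrefixOf]]
        rw [ih f (by simpa using hf) [] (cur.reverse :: acc)]
        simp [pvSplit]
      · rw [show PySem.Chars.splitOn.go ['\\'] (f+1) (c :: r) cur acc
              = PySem.Chars.splitOn.go ['\\'] f r (c :: cur) acc from by
            simp [PySem.Chars.splitOn.go, List.isPrefixOf, beq_iff_eq, Ne.symm hc]]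
        rw [ih f (by simpa using hf) (c :: cur) acc]
        simp [pvSplit, hc]

lemma pvSplitOn_eq (cs : List Char) :
    PySem.Chars.splitOn cs ['\\'] = (pvSplit cs).1 :: (pvSplit cs).2 := by
  unfold PySem.Chars.splitOn
  rw [pvGo_spec cs (cs.length + 1) (by omega) [] []]
  simp

lemma pvLookup_eq (c : Char) (tl : List Char) :
    (match PySem.Dict.get? pvEscTable c with
     | some r => r :: tl
     | none => '\\' :: c :: tl) = pvRep c ++ tl := by
  unfold pvRep
  split_ifs with h1 h2 h3 h4 h5
  · subst h1; rfl
  · subst h2; rfl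
  · subst h3; rfl
  · subst h4; rfl
  · subst h5; rfl
  · have e1 : ('"' == c) = false := by simp [Ne.symm h1]
    have e2 : ('\\' == c) = false := by simp [Ne.symm h2]
    have e3 : ('n' == c) = false := by simp [Ne.symm h3]
    have e4 : ('t' == c) = false := by simp [Ne.symm h4]
    have e5 : ('r' == c) = false := by simp [Ne.symm h5]
    simp [PySem.Dict.get?, pvEscTable, List.find?, e1, e2, e3, e4, e5]

lemma pvB_flatten (cs : List Char) :
    (pvSplit cs).1 ++ (pvPieces (pvSplit cs).2).flatten = pvUnesc cs := by
  induction cs using pvUnesc.induct with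
  | case1 => simp [pvSplit, pvPieces, pvUnesc]
  | case2 c =>
    by_cases hc : c = '\\' <;> simp [pvSplit, pvPieces, pvUnesc, hc]
  | case3 d rest ih =>
    rw [show pvSplit ('\\' :: d :: rest) = ([], (pvSplit (d :: rest)).1 :: (pvSplit (d :: rest)).2)
          from by simp [pvSplit]]
    by_cases hd : d = '\\'
    · subst hd
      rw [show pvSplit ('\\' :: rest) = ([], (pvSplit rest).1 :: (pvSplit rest).2)
            from by simp [pvSplit]]
      simp [pvPieces, pvUnesc, pvRep, ih]
    · rw [show pvSplit (d :: rest) = (d :: (pvSplit rest).1, (pvSplit rest).2)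
            from by simp [pvSplit, hd]]
      simp [pvPieces, pvLookup_eq, pvUnesc, List.append_assoc, ih]
  | case4 c d rest h ih =>
    rw [show pvSplit (c :: d :: rest) = (c :: (pvSplit (d :: rest)).1, (pvSplit (d :: rest)).2)
          from by simp [pvSplit, h]]
    have hu : pvUnesc (c :: d :: rest) = c :: pvUnesc (d :: rest) := by simp [pvUnesc, h]
    rw [hu]
    simp [ih]

lemma pvUnesc_drop_esc (cs : List Char) (i : Nat) (h1 : i + 1 < cs.length)
    (hb : cs[i]'(by omega) = '\\') :
    pvUnesc (cs.drop i) = pvRep (cs[i+1]) ++ pvUnesc (cs.drop (i+2)) := by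
  have h : i < cs.length := by omega
  rw [← List.getElem_cons_drop h, ← List.getElem_cons_drop h1]
  simp [pvUnesc, hb]

lemma pvUnesc_drop_one (cs : List Char) (i : Nat) (h : i < cs.length)
    (hn : ¬(cs[i] = '\\' ∧ i + 1 < cs.length)) :
    pvUnesc (cs.drop i) = cs[i] :: pvUnesc (cs.drop (i+1)) := by
  rw [← List.getElem_cons_drop h]
  apply pvUnesc_cons
  by_cases hb : cs[i] = '\\'
  · right
    have : cs.length ≤ i + 1 := by
      rcases Nat.lt_or_ge (i+1) cs.length with hl | hl
      · exact absurd ⟨hb, hl⟩ hn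
      · exact hl
    exact List.drop_eq_nil_of_le this
  · exact Or.inl hb

lemma pvA_flatten (cs : List Char) (i : Nat) (result : List (List Char)) :
    (unescapeALoop cs i result).flatten = result.flatten ++ pvUnesc (cs.drop i) := by
  induction i, result using unescapeALoop.induct cs with
  | case1 i result h h1 nxt hq ih =>
    have hq' : cs[i+1]'h1.2 = '"' := hq
    rw [unescapeALoop]
    simp only [dif_pos h, dif_pos h1, if_pos hq']
    rw [ih, pvUnesc_drop_esc cs i h1.2 h1.1]
    simp [pvRep, hq']
  | case2 i result h h1 nxt e1 hq ih =>
    have e1' : ¬ cs[i+1]'h1.2 = '"' := e1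
    have hq' : cs[i+1]'h1.2 = '\\' := hq
    rw [unescapeALoop]
    simp only [dif_pos h, dif_pos h1, if_neg e1', if_pos hq']
    rw [ih, pvUnesc_drop_esc cs i h1.2 h1.1]
    simp [pvRep, hq']
  | case3 i result h h1 nxt e1 e2 hq ih =>
    have e1' : ¬ cs[i+1]'h1.2 = '"' := e1
    have e2' : ¬ cs[i+1]'h1.2 = '\\' := e2
    have hq' : cs[i+1]'h1.2 = 'n' := hq
    rw [unescapeALoop]
    simp only [dif_pos h, dif_pos h1, if_neg e1', if_neg e2', if_pos hq']
    rw [ih, pvUnesc_drop_esc cs i h1.2 h1.1]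
    simp [pvRep, hq']
  | case4 i result h h1 nxt e1 e2 e3 hq ih =>
    have e1' : ¬ cs[i+1]'h1.2 = '"' := e1
    have e2' : ¬ cs[i+1]'h1.2 = '\\' := e2
    have e3' : ¬ cs[i+1]'h1.2 = 'n' := e3
    have hq' : cs[i+1]'h1.2 = 't' := hq
    rw [unescapeALoop]
    simp only [dif_pos h, dif_pos h1, if_neg e1', if_neg e2', if_neg e3', if_pos hq']
    rw [ih, pvUnesc_drop_esc cs i h1.2 h1.1]
    simp [pvRep, hq']
  | case5 i result h h1 nxt e1 e2 e3 e4 hq ih =>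
    have e1' : ¬ cs[i+1]'h1.2 = '"' := e1
    have e2' : ¬ cs[i+1]'h1.2 = '\\' := e2
    have e3' : ¬ cs[i+1]'h1.2 = 'n' := e3
    have e4' : ¬ cs[i+1]'h1.2 = 't' := e4
    have hq' : cs[i+1]'h1.2 = 'r' := hq
    rw [unescapeALoop]
    simp only [dif_pos h, dif_pos h1, if_neg e1', if_neg e2', if_neg e3', if_neg e4', if_pos hq']
    rw [ih, pvUnesc_drop_esc cs i h1.2 h1.1]
    simp [pvRep, hq']
  | case6 i result h h1 nxt e1 e2 e3 e4 e5 ih =>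
    have e1' : ¬ cs[i+1]'h1.2 = '"' := e1
    have e2' : ¬ cs[i+1]'h1.2 = '\\' := e2
    have e3' : ¬ cs[i+1]'h1.2 = 'n' := e3
    have e4' : ¬ cs[i+1]'h1.2 = 't' := e4
    have e5' : ¬ cs[i+1]'h1.2 = 'r' := e5
    rw [unescapeALoop]
    simp only [dif_pos h, dif_pos h1, if_neg e1', if_neg e2', if_neg e3', if_neg e4', if_neg e5']
    rw [ih, pvUnesc_drop_esc cs i h1.2 h1.1]
    simp [pvRep, e1', e2', e3', e4', e5', h1.1]
    rfl
  | case7 i result h hn ih =>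
    rw [unescapeALoop]
    simp only [dif_pos h, dif_neg hn]
    rw [ih, pvUnesc_drop_one cs i h hn]
    simp
  | case8 i result h =>
    rw [unescapeALoop]
    simp only [dif_neg h]
    rw [List.drop_eq_nil_of_le (by omega)]
    simp [pvUnesc]

-- ===== VERDICT (by name: the statement is the Claim_ definition above) =====
theorem unescape_basic_string_py_spec : Claim_equal_unescape_basic_string_py := by
  intro s _
  unfold Spec_unescape_basic_string_py unescape_basic_string_py unescape_basic_string_py_alt
  have hA := pvA_flatten s.toList 0 []
  have hB := pvB_flatten s.toList
  simp only [pvSplitOn_eq, pvJoin_nil_eq_flatten, List.flatten_nil, List.nil_append] at *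
  simp [hA, ← hB]
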